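-- pv_equiv track=rewrite | github.com/Jeevanantham-M-0423/OnboardIQ | app/services/gap_analyzer.py | find_skill_gap
-- ===== SOURCE A (Python) =====
-- from typing import Iterable
--
-- def find_skill_gap(
--     resume_skills: Iterable[str],
--     jd_skills: Iterable[str],
-- ) -> dict[str, list[str]]:
--     resume_set = {skill.strip() for skill in resume_skills if skill and skill.strip()}
--     jd_set = {skill.strip() for skill in jd_skills if skill and skill.strip()}
--
--     missing_skills = sorted(jd_set - resume_set)
--     matched_skills = sorted(jd_set & resume_set)
--
--     return {
--         "missing_skills": missing_skills,
--         "matched_skills": matched_skills,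
--     }
-- ===== SOURCE B (Python) =====
-- def find_skill_gap(resume_skills, jd_skills):
--     def cleaned_sorted_unique(skills):
--         cleaned = sorted(s.strip() for s in skills if s and s.strip())
--         out = []
--         for c in cleaned:
--             if not out or out[-1] != c:
--                 out.append(c)
--         return out
--
--     r = cleaned_sorted_unique(resume_skills)
--     j = cleaned_sorted_unique(jd_skills)
--     matched, missing = [], []
--     i = k = 0
--     while i < len(j) and k < len(r):
--         if j[i] == r[k]:
--             matched.append(j[i]); i += 1; k += 1
--         elif j[i] < r[k]:
--             missing.append(j[i]); i += 1
--         else: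
--             k += 1
--     missing.extend(j[i:])
--     return {"missing_skills": missing, "matched_skills": matched}
-- ===== Notes on version B (the rewrite author's own statement) =====
-- stated objective: alternative
-- what changed: Replaces hash-set comprehensions with set difference/intersection and two output sorts by sorting each cleaned list, removing adjacent duplicates, and computing matched/missing in one two-pointer merge of the two sorted unique lists.
import Mathlib
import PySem

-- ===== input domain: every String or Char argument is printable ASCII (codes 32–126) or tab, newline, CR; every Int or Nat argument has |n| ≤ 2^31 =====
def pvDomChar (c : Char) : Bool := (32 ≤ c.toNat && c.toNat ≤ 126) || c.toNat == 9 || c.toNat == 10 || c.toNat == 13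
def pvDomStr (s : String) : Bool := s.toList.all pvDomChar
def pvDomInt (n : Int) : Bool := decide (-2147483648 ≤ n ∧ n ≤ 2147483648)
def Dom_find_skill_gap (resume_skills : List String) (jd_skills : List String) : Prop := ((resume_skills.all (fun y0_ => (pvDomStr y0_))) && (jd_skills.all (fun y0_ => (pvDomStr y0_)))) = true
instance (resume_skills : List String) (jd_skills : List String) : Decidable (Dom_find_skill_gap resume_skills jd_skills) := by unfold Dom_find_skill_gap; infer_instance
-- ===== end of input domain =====

-- B replaces hash-set difference/intersection plus two output sorts by sort-then-adjacent-dedup of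
-- both cleaned lists and a single sorted two-pointer merge producing matched/missing (objective: alternative).

-- ===== PORT A =====
def find_skill_gap (resume_skills : List String) (jd_skills : List String) : List (String × List String) :=
  let resume_set : PySem.Set String :=
    PySem.Set.ofList ((resume_skills.filter (fun skill => decide (skill ≠ "") && decide (PySem.Str.strip skill ≠ ""))).map PySem.Str.strip)
  let jd_set : PySem.Set String :=
    PySem.Set.ofList ((jd_skills.filter (fun skill => decide (skill ≠ "") && decide (PySem.Str.strip skill ≠ ""))).map PySem.Str.strip)
  let missing_skills := PySem.List.sorted (PySem.Set.diff jd_set resume_set) (fun x => x) false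
  let matched_skills := PySem.List.sorted (PySem.Set.inter jd_set resume_set) (fun x => x) false
  [("missing_skills", missing_skills), ("matched_skills", matched_skills)]

-- ===== PORT B =====
-- Source B's cleaned_sorted_unique: sort the cleaned skills, then drop adjacent duplicates in one loop
def pvCleanSortedUnique (skills : List String) : List String :=
  let cleaned := PySem.List.sorted
    ((skills.filter (fun s => decide (s ≠ "") && decide (PySem.Str.strip s ≠ ""))).map PySem.Str.strip)
    (fun x => x) false
  cleaned.foldl (fun out c => if out.getLast? = some c then out else out ++ [c]) []

-- Source B's while loop with two indices plus the trailing missing.extend(j[i:]), as structural recursion: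
-- returns (matched, missing)
def pvMerge : List String → List String → List String × List String
  | [], _ => ([], [])
  | a :: j', [] => ([], a :: j')
  | a :: j', b :: r' =>
    if a = b then
      let p := pvMerge j' r'
      (a :: p.1, p.2)
    else if a < b then
      let p := pvMerge j' (b :: r')
      (p.1, a :: p.2)
    else
      pvMerge (a :: j') r'
termination_by j r => j.length + r.length

def find_skill_gap_alt (resume_skills : List String) (jd_skills : List String) : List (String × List String) :=
  let r := pvCleanSortedUnique resume_skills
  let j := pvCleanSortedUnique jd_skills
  let p := pvMerge j r
  [("missing_skills", p.2), ("matched_skills", p.1)]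

-- ===== PRECONDITION & SPEC =====
def Spec_find_skill_gap (resume_skills : List String) (jd_skills : List String) (out : List (String × List String)) : Prop := out = find_skill_gap_alt resume_skills jd_skills
instance (resume_skills : List String) (jd_skills : List String) (out : List (String × List String)) : Decidable (Spec_find_skill_gap resume_skills jd_skills out) := by unfold Spec_find_skill_gap; infer_instance

-- ===== CLAIM (what is proved, stated in full; the proofs are below) =====
def Claim_equal_find_skill_gap : Prop := ∀ (resume_skills : List String) (jd_skills : List String), Dom_find_skill_gap resume_skills jd_skills → Spec_find_skill_gap resume_skills jd_skills (find_skill_gap resume_skills jd_skills)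

-- ===== LEMMAS AND PROOFS =====

-- in a strictly increasing list the last element is maximal
theorem pv_last_max (acc : List String) (m : String)
    (h : acc.Pairwise (· < ·)) (hm : acc.getLast? = some m) :
    ∀ a ∈ acc, a ≤ m := by
  induction acc with
  | nil => simp at hm
  | cons x t ih =>
    rcases List.pairwise_cons.mp h with ⟨hx, ht⟩
    cases t with
    | nil =>
      simp at hm; subst hm; simp
    | cons y t' =>
      rw [List.getLast?_cons_cons] at hm
      intro a ha
      rcases List.mem_cons.mp ha with rfl | ha'
      · have : m ∈ y :: t' := List.mem_of_getLast? hm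
        exact le_of_lt (hx m this)
      · exact ih ht hm a ha'

-- the adjacent-dedup fold of a (≤)-sorted list is strictly increasing, with the same members
theorem pv_dedup_fold (l : List String) (acc : List String)
    (hl : l.Pairwise (· ≤ ·)) (hacc : acc.Pairwise (· < ·))
    (hle : ∀ a ∈ acc, ∀ b ∈ l, a ≤ b) :
    (l.foldl (fun out c => if out.getLast? = some c then out else out ++ [c]) acc).Pairwise (· < ·) ∧
    ∀ x, x ∈ l.foldl (fun out c => if out.getLast? = some c then out else out ++ [c]) acc ↔ (x ∈ acc ∨ x ∈ l) := by
  induction l generalizing acc with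
  | nil => exact ⟨hacc, by simp⟩
  | cons c l ih =>
    rcases List.pairwise_cons.mp hl with ⟨hc, hl'⟩
    simp only [List.foldl_cons]
    by_cases h : acc.getLast? = some c
    · rw [if_pos h]
      have hcmem : c ∈ acc := List.mem_of_getLast? h
      have := ih acc hl' hacc (fun a ha b hb => hle a ha b (List.mem_cons_of_mem _ hb))
      refine ⟨this.1, fun x => ?_⟩
      rw [this.2 x]
      simp only [List.mem_cons]
      constructor
      · tauto
      · rintro (hx | rfl | hx) <;> tauto
    · rw [if_neg h]
      have hlt : ∀ a ∈ acc, a < c := by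
        intro a ha
        have hle' := hle a ha c (List.mem_cons_self)
        rcases lt_or_eq_of_le hle' with hlt | heq
        · exact hlt
        · exfalso
          subst heq
          have hne : acc ≠ [] := by intro hn; rw [hn] at ha; simp at ha
          obtain ⟨m, hm⟩ := Option.isSome_iff_exists.mp (List.getLast?_isSome.mpr hne)
          have hma : m ∈ acc := List.mem_of_getLast? hm
          have hm_le : m ≤ a := hle m hma a (List.mem_cons_self)
          have ham : a ≤ m := pv_last_max acc m hacc hm a ha
          have hma' : m = a := le_antisymm hm_le ham
          exact h (hma' ▸ hm)
      have hacc' : (acc ++ [c]).Pairwise (· < ·) := by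
        rw [List.pairwise_append]
        exact ⟨hacc, List.pairwise_singleton _ _, fun a ha b hb => by
          simp at hb; subst hb; exact hlt a ha⟩
      have hle' : ∀ a ∈ acc ++ [c], ∀ b ∈ l, a ≤ b := by
        intro a ha b hb
        rcases List.mem_append.mp ha with ha' | ha'
        · exact hle a ha' b (List.mem_cons_of_mem _ hb)
        · simp at ha'; subst ha'; exact hc b hb
      have := ih (acc ++ [c]) hl' hacc' hle'
      refine ⟨this.1, fun x => ?_⟩
      rw [this.2 x]
      simp only [List.mem_append, List.mem_cons]
      tauto

-- Source B's cleaned_sorted_unique computes the sorted list of A's cleaned set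
theorem pvCleanSortedUnique_eq (skills : List String) :
    pvCleanSortedUnique skills
      = PySem.List.sorted
          (PySem.Set.ofList ((skills.filter (fun s => decide (s ≠ "") && decide (PySem.Str.strip s ≠ ""))).map PySem.Str.strip))
          (fun x => x) false := by
  unfold pvCleanSortedUnique
  set c0 := (skills.filter (fun s => decide (s ≠ "") && decide (PySem.Str.strip s ≠ ""))).map PySem.Str.strip with hc0
  set srt := PySem.List.sorted c0 (fun x => x) false with hsrt
  have hpw : srt.Pairwise (· ≤ ·) := PySem.List.sorted_pairwise c0 (fun x => x)
  have hd := pv_dedup_fold srt [] hpw (List.Pairwise.nil) (by simp)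
  set ys := srt.foldl (fun out c => if out.getLast? = some c then out else out ++ [c]) [] with hys
  symm
  apply PySem.List.sorted_eq_of_perm_of_pairwise_lt
  · -- ys ~ ofList c0
    have hnd1 : ys.Nodup := hd.1.imp (fun h => ne_of_lt h)
    have hnd2 : (PySem.Set.ofList c0).Nodup := PySem.Set.nodup_ofList c0
    apply List.perm_of_nodup_nodup_toFinset_eq hnd1 hnd2
    ext x
    simp only [List.mem_toFinset]
    rw [hd.2 x, hsrt]
    simp [PySem.List.mem_sorted, PySem.Set.mem_ofList]
  · exact hd.1

-- the merge of two strictly increasing lists partitions j by membership in r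
theorem pvMerge_spec (j r : List String)
    (hj : j.Pairwise (· < ·)) (hr : r.Pairwise (· < ·)) :
    pvMerge j r = (j.filter (fun c => decide (c ∈ r)), j.filter (fun c => decide (c ∉ r))) := by
  induction j, r using pvMerge.induct with
  | case1 r => simp [pvMerge]
  | case2 a j' => simp [pvMerge]
  | case3 j' b r' ih =>
    rcases List.pairwise_cons.mp hj with ⟨haj, hj'⟩
    rcases List.pairwise_cons.mp hr with ⟨hbr, hr'⟩
    set a := b with ha
    rw [pvMerge, if_pos rfl, ih hj' hr']
    simp only [List.filter_cons, List.mem_cons, Prod.mk.injEq]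
    norm_num
    constructor
    · apply List.filter_congr
      intro x hx
      have : x ≠ a := ne_of_gt (haj x hx)
      simp [this]
    · apply List.filter_congr
      intro x hx
      have : x ≠ a := ne_of_gt (haj x hx)
      simp [this]
  | case4 a j' b r' hab halt ih =>
    rcases List.pairwise_cons.mp hj with ⟨haj, hj'⟩
    have hanotin : a ∉ b :: r' := by
      intro hmem
      rcases List.mem_cons.mp hmem with rfl | hmem'
      · exact hab rfl
      · have := (List.pairwise_cons.mp hr).1 a hmem'
        exact absurd halt (not_lt_of_gt this)
    have ha1 : a ∉ r' := fun hm => hanotin (List.mem_cons_of_mem _ hm)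
    rw [pvMerge, if_neg hab, if_pos halt, ih hj' hr]
    simp [hab, ha1]
  | case5 a j' b r' hab halt ih =>
    rcases List.pairwise_cons.mp hr with ⟨hbr, hr'⟩
    have hblt : b < a := by
      rcases lt_trichotomy a b with h | h | h
      · exact absurd h halt
      · exact absurd h hab
      · exact h
    have hfilt : ∀ (x : String), x ∈ a :: j' → (x ∈ b :: r' ↔ x ∈ r') := by
      intro x hx
      have hax : a ≤ x := by
        rcases List.mem_cons.mp hx with rfl | hx'
        · exact le_refl x
        · exact le_of_lt ((List.pairwise_cons.mp hj).1 x hx')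
      have : x ≠ b := ne_of_gt (lt_of_lt_of_le hblt hax)
      simp [List.mem_cons, this]
    rw [pvMerge, if_neg hab, if_neg halt, ih hj hr']
    have h1 : List.filter (fun c => decide (c ∈ b :: r')) (a :: j') = List.filter (fun c => decide (c ∈ r')) (a :: j') := by
      apply List.filter_congr; intro x hx; simp [hfilt x hx]
    have h2 : List.filter (fun c => decide (c ∉ b :: r')) (a :: j') = List.filter (fun c => decide (c ∉ r')) (a :: j') := by
      apply List.filter_congr; intro x hx; simp [hfilt x hx]
    rw [h1, h2]

-- ===== VERDICT (by name: the statement is the Claim_ definition above) =====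
theorem find_skill_gap_spec : Claim_equal_find_skill_gap := by
  intro rs js _
  show find_skill_gap rs js = find_skill_gap_alt rs js
  unfold find_skill_gap find_skill_gap_alt
  simp only [pvCleanSortedUnique_eq]
  set R := PySem.Set.ofList ((rs.filter (fun s => decide (s ≠ "") && decide (PySem.Str.strip s ≠ ""))).map PySem.Str.strip) with hR
  set J := PySem.Set.ofList ((js.filter (fun s => decide (s ≠ "") && decide (PySem.Str.strip s ≠ ""))).map PySem.Str.strip) with hJ
  have hsortJ : (PySem.List.sorted J (fun x => x) false).Pairwise (· < ·) :=
    PySem.List.sorted_ofList_pairwise_lt _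
  have hsortR : (PySem.List.sorted R (fun x => x) false).Pairwise (· < ·) :=
    PySem.List.sorted_ofList_pairwise_lt _
  have hsperm : (PySem.List.sorted J (fun x => x) false).Perm J := PySem.List.sorted_perm _ _ _
  rw [pvMerge_spec _ _ hsortJ hsortR]
  have hmemR : ∀ x, (x ∈ PySem.List.sorted R (fun y => y) false) ↔ PySem.Set.contains R x = true := by
    intro x; rw [PySem.List.mem_sorted]; simp
  have hmiss : PySem.List.sorted (PySem.Set.diff J R) (fun x => x) false
      = (PySem.List.sorted J (fun x => x) false).filter (fun c => decide (c ∉ PySem.List.sorted R (fun y => y) false)) := by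
    apply PySem.List.sorted_eq_of_perm_of_pairwise_lt
    · have : (PySem.List.sorted J (fun x => x) false).filter (fun c => decide (c ∉ PySem.List.sorted R (fun y => y) false))
          = (PySem.List.sorted J (fun x => x) false).filter (fun c => !PySem.Set.contains R c) := by
        apply List.filter_congr; intro x _
        by_cases h : PySem.Set.contains R x = true <;> simp [hmemR x]
      rw [this]
      exact (hsperm.filter _)
    · exact hsortJ.sublist List.filter_sublist
  have hmatch : PySem.List.sorted (PySem.Set.inter J R) (fun x => x) false
      = (PySem.List.sorted J (fun x => x) false).filter (fun c => decide (c ∈ PySem.List.sorted R (fun y => y) false)) := by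
    apply PySem.List.sorted_eq_of_perm_of_pairwise_lt
    · have : (PySem.List.sorted J (fun x => x) false).filter (fun c => decide (c ∈ PySem.List.sorted R (fun y => y) false))
          = (PySem.List.sorted J (fun x => x) false).filter (fun c => PySem.Set.contains R c) := by
        apply List.filter_congr; intro x _
        by_cases h : PySem.Set.contains R x = true <;> simp [hmemR x]
      rw [this]
      exact (hsperm.filter _)
    · exact hsortJ.sublist List.filter_sublist
  simp [hmiss, hmatch]
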